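-- pv_equiv track=rewrite | github.com/pypi-data/pypi-mirror-198 | packages/bottlenest/bottlenest-0.0.5-py3-none-any.whl/bottlenest/common/Controller.py | nestjsToFlaskPath
-- ===== SOURCE A (Python) =====
-- def nestjsToFlaskPath(path: str) -> str:
--     result = ''
--     parts = path.split('/')
--     for part in parts:
--         if part.startswith(':'):
--             result += '/<' + part[1:] + '>'
--         else:
--             result += '/' + part
--     return result[1:]
-- ===== SOURCE B (Python) =====
-- def nestjsToFlaskPath(path: str) -> str:
--     # single left-to-right character scan; no split/join
--     out = []
--     i = 0
--     n = len(path)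
--     seg_start = True
--     while i < n:
--         c = path[i]
--         if seg_start and c == ':':
--             j = i + 1
--             while j < n and path[j] != '/':
--                 j += 1
--             out.append('<' + path[i + 1:j] + '>')
--             i = j
--             seg_start = False
--         elif c == '/':
--             out.append('/')
--             i += 1
--             seg_start = True
--         else:
--             out.append(c)
--             i += 1
--             seg_start = False
--     return ''.join(out)
-- ===== Notes on version B (the rewrite author's own statement) =====
-- stated objective: alternative
-- what changed: Replaces the split-on-separator, per-part rebuild and leading-separator strip by a single left-to-right character scan that rewrites colon-parameters in place at segment starts.
import Mathlib
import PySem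

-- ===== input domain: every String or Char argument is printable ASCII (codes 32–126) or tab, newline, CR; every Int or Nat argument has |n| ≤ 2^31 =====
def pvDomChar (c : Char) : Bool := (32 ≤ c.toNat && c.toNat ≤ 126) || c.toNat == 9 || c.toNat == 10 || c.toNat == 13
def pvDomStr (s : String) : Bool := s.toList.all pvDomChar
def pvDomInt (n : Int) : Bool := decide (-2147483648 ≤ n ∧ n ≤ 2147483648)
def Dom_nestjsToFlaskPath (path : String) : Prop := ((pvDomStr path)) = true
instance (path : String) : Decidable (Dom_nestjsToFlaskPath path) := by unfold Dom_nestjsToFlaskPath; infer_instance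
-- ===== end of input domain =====

-- B replaces A's split-on-separator, per-part rebuild and leading-separator strip by a
-- single left-to-right character scan (alternative decomposition, same cost).

-- ===== PORT A =====
-- A: split the path on the separator, rebuild each part (parameter parts bracketed), strip the leading separator
def nestjsToFlaskPath (path : String) : String :=
  let parts : List String := (PySem.Str.split? path "/").getD []
  let result : String :=
    parts.foldl (fun result part =>
      if PySem.Str.startswith part ":" then
        result ++ "/<" ++ PySem.Str.slice part (some 1) none ++ ">"
      else
        result ++ "/" ++ part) ""
  PySem.Str.slice result (some 1) none

-- ===== PORT B =====
-- B: one character scan; at a segment start a colon swallows the rest of the segment into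
-- a bracketed parameter (the inner 'while' of Source B is the takeWhile/dropWhile pair).
def scanB : List Char → Bool → List Char
  | [], _ => []
  | c :: rest, segStart =>
    if segStart && (c == ':') then
      ('<' :: rest.takeWhile (fun x => x ≠ '/')) ++
        ('>' :: scanB (rest.dropWhile (fun x => x ≠ '/')) false)
    else if c == '/' then
      '/' :: scanB rest true
    else
      c :: scanB rest false
  termination_by l _ => l.length
  decreasing_by
    · exact Nat.lt_succ_of_le (List.length_dropWhile_le _ _)
    · simp
    · simp

def nestjsToFlaskPath_alt (path : String) : String :=
  String.ofList (scanB path.toList true)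

-- ===== PRECONDITION & SPEC =====
def Spec_nestjsToFlaskPath (path : String) (out : String) : Prop := out = nestjsToFlaskPath_alt path
instance (path : String) (out : String) : Decidable (Spec_nestjsToFlaskPath path out) := by unfold Spec_nestjsToFlaskPath; infer_instance

-- ===== CLAIM (what is proved, stated in full; the proofs are below) =====
def Claim_equal_nestjsToFlaskPath : Prop := ∀ (path : String), Dom_nestjsToFlaskPath path → Spec_nestjsToFlaskPath path (nestjsToFlaskPath path)

-- ===== LEMMAS AND PROOFS =====

def sc : List Char → List Char × List (List Char)
  | [] => ([], [])
  | c :: t => if c = '/' then ([], (sc t).1 :: (sc t).2) else (c :: (sc t).1, (sc t).2)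

def conv (p : List Char) : List Char :=
  match p with
  | ':' :: s => '<' :: s ++ ['>']
  | _ => p

def rend (ps : List (List Char)) : List Char := ps.flatMap (fun p => '/' :: conv p)

lemma go_spec : ∀ (fuel : Nat) (l cur : List Char) (hacc : List (List Char)),
    l.length ≤ fuel →
    PySem.Chars.splitOn.go ['/'] fuel l cur hacc =
      hacc.reverse ++ ((cur.reverse ++ (sc l).1) :: (sc l).2) := by
  intro fuel
  induction fuel with
  | zero =>
    intro l cur hacc h
    have : l = [] := List.length_eq_zero_iff.mp (Nat.le_zero.mp h)
    subst this
    simp [PySem.Chars.splitOn.go, sc]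
  | succ f ih =>
    intro l cur hacc h
    cases l with
    | nil => simp [PySem.Chars.splitOn.go, sc]
    | cons c rest =>
      have hlen : rest.length ≤ f := by simpa using h
      by_cases hc : c = '/'
      · subst hc
        rw [PySem.Chars.splitOn.go]
        simp only [List.isPrefixOf_cons₂, List.isPrefixOf_nil_left, beq_self_eq_true, Bool.true_and,
          if_true, List.length_cons, List.length_nil, List.drop_succ_cons, List.drop_zero]
        rw [ih rest [] _ hlen]
        simp [sc]
      · rw [PySem.Chars.splitOn.go]
        have hpre : List.isPrefixOf ['/'] (c :: rest) = false := by
          simp only [List.isPrefixOf_cons₂, List.isPrefixOf_nil_left, Bool.and_true, beq_eq_false_iff_ne]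
          exact fun e => hc e.symm
        rw [hpre]
        simp only [Bool.false_eq_true, if_false]
        rw [ih rest (c :: cur) _ hlen]
        simp [sc, hc]

lemma splitOn_eq (l : List Char) :
    PySem.Chars.splitOn l ['/'] = (sc l).1 :: (sc l).2 := by
  unfold PySem.Chars.splitOn
  rw [go_spec (l.length + 1) l [] [] (by omega)]
  simp

lemma sc_take (l : List Char) : (sc l).1 = l.takeWhile (fun x => x ≠ '/') := by
  induction l with
  | nil => simp [sc]
  | cons c t ih =>
    by_cases hc : c = '/'
    · subst hc; simp [sc, List.takeWhile]
    · simp [sc, List.takeWhile, hc, ih]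

lemma sc_drop (l : List Char) :
    (l.dropWhile (fun x => x ≠ '/') = [] ∧ (sc l).2 = []) ∨
    (∃ u, l.dropWhile (fun x => x ≠ '/') = '/' :: u ∧ (sc l).2 = (sc u).1 :: (sc u).2) := by
  induction l with
  | nil => left; simp [sc]
  | cons c t ih =>
    by_cases hc : c = '/'
    · subst hc; right; exact ⟨t, by simp [List.dropWhile], by simp [sc]⟩
    · rcases ih with ⟨h1, h2⟩ | ⟨u, h1, h2⟩
      · left; constructor
        · simpa [List.dropWhile, hc] using h1
        · simp [sc, hc, h2]
      · right; exact ⟨u, by simpa [List.dropWhile, hc] using h1, by simp [sc, hc, h2]⟩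

lemma length_dropWhile_cons {u : List Char} {p : Char → Bool} {l : List Char} {c : Char}
    (h : l.dropWhile p = c :: u) : u.length < l.length := by
  have := List.length_dropWhile_le p l
  rw [h] at this
  simp at this; omega

lemma scan_spec : ∀ (n : Nat) (l : List Char), l.length ≤ n →
    scanB l true = conv (sc l).1 ++ rend (sc l).2 ∧
    scanB l false = (sc l).1 ++ rend (sc l).2 := by
  intro n
  induction n with
  | zero =>
    intro l h
    have : l = [] := List.length_eq_zero_iff.mp (Nat.le_zero.mp h)
    subst this; simp [scanB, sc, conv, rend]
  | succ m ih =>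
    intro l h
    cases l with
    | nil => simp [scanB, sc, conv, rend]
    | cons c rest =>
      have hlen : rest.length ≤ m := by simpa using h
      by_cases hc : c = ':'
      · subst hc
        constructor
        · -- true mode, ':' head
          rw [scanB]
          simp only [beq_self_eq_true, Bool.and_true, if_true]
          have hsc : sc (':' :: rest) = (':' :: (sc rest).1, (sc rest).2) := by
            simp [sc]
          rw [hsc]
          have hconv : conv (':' :: (sc rest).1) = '<' :: (sc rest).1 ++ ['>'] := by
            simp [conv]
          rw [hconv, ← sc_take]
          rcases sc_drop rest with ⟨h1, h2⟩ | ⟨u, h1, h2⟩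
          · rw [h1, h2]; simp [scanB, rend]
          · rw [h1, h2]
            have hu : u.length ≤ m := by
              have := length_dropWhile_cons h1; omega
            rw [scanB]
            simp only [Bool.false_and, beq_self_eq_true, if_true]
            rw [(ih u hu).1]
            simp [rend]
        · -- false mode, ':' head: copied verbatim
          rw [scanB]
          simp only [Bool.false_and]
          have : (':' == '/') = false := by decide
          rw [this]
          simp only [Bool.false_eq_true, if_false]
          rw [(ih rest hlen).2]
          simp [sc]
      · by_cases hs : c = '/'
        · subst hs
          have key : scanB ('/' :: rest) true = '/' :: scanB rest true ∧
              scanB ('/' :: rest) false = '/' :: scanB rest true := by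
            constructor <;> (rw [scanB]; simp)
          rw [key.1, key.2, (ih rest hlen).1]
          simp [sc, conv, rend]
        · have key : ∀ b, scanB (c :: rest) b = c :: scanB rest false := by
            intro b
            rw [scanB]
            have h1 : (c == ':') = false := by simpa using hc
            have h2 : (c == '/') = false := by simpa using hs
            simp [h1, h2]
          rw [key, key, (ih rest hlen).2]
          have hcv : conv (c :: (sc rest).1) = c :: (sc rest).1 := by
            unfold conv
            split
            · next heq =>
                cases heq
                exact absurd rfl hc
            · rfl
          simp [sc, hs, hcv]

lemma step_spec (res part : String) :
    ((if PySem.Str.startswith part ":" then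
        res ++ "/<" ++ PySem.Str.slice part (some 1) none ++ ">"
      else
        res ++ "/" ++ part) : String).toList = res.toList ++ '/' :: conv part.toList := by
  by_cases hp : PySem.Str.startswith part ":" = true
  · rw [if_pos hp]
    have : [':'] <+: part.toList := by
      rw [PySem.Str.startswith_eq] at hp
      exact (PySem.Chars.startswith_iff part.toList (":" : String).toList).mp hp
    obtain ⟨s, hs⟩ := this
    simp only [String.toList_append]
    have hsl : (PySem.Str.slice part (some 1) none).toList = part.toList.tail := by
      rw [PySem.Str.toList_slice, PySem.Chars.slice_eq_listSlice, PySem.List.slice_from_one]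
    rw [hsl, ← hs]
    simp [conv]
  · rw [if_neg hp]
    have : conv part.toList = part.toList := by
      rw [PySem.Str.startswith_eq] at hp
      unfold conv
      split
      · next heq =>
        exfalso
        apply hp
        rw [PySem.Chars.startswith_iff, heq]
        exact ⟨_, rfl⟩
      · rfl
    simp [this]

lemma foldl_spec (parts : List String) (res : String) :
    (parts.foldl (fun result part =>
      if PySem.Str.startswith part ":" then
        result ++ "/<" ++ PySem.Str.slice part (some 1) none ++ ">"
      else
        result ++ "/" ++ part) res).toList
    = res.toList ++ rend (parts.map String.toList) := by
  induction parts generalizing res with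
  | nil => simp [rend]
  | cons p ps ih =>
    simp only [List.foldl_cons, List.map_cons]
    rw [ih, step_spec]
    simp [rend]

lemma A_chars (path : String) :
    (nestjsToFlaskPath path).toList = conv (sc path.toList).1 ++ rend (sc path.toList).2 := by
  unfold nestjsToFlaskPath
  have hs : PySem.Str.split? path "/" =
      some (List.map String.ofList ((sc path.toList).1 :: (sc path.toList).2)) := by
    unfold PySem.Str.split?
    rw [show ("/" : String).toList = ['/'] from rfl]
    unfold PySem.Chars.split?
    rw [if_neg (by simp), splitOn_eq]
    rfl
  rw [hs]
  simp only [Option.getD_some]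
  rw [PySem.Str.toList_slice, PySem.Chars.slice_eq_listSlice, PySem.List.slice_from_one,
    foldl_spec]
  simp [rend, List.map_map, Function.comp_def, String.toList_ofList]

-- ===== VERDICT (by name: the statement is the Claim_ definition above) =====
theorem nestjsToFlaskPath_spec : Claim_equal_nestjsToFlaskPath := by
  intro path _
  unfold Spec_nestjsToFlaskPath
  apply String.toList_inj.mp
  rw [A_chars]
  have h := (scan_spec path.toList.length path.toList le_rfl).1
  simp [nestjsToFlaskPath_alt, h]
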